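-- pv_equiv track=rewrite | github.com/Roolymoo/diffstat | curvecompare.py | pairwise_duplicates
-- ===== SOURCE A (Python) =====
-- def pairwise_duplicates(iterations, iter_indices):
--     """(dict, list) -> dict
--     Returns the shared curves between each iteration in iterations.
--
--     Assumes iter_indices is a sorted list of all the iteration numbers for iterations. Let i in iter_indices. For each
--     j in iter_indices such that j > i, there is Sij equal to the intersection of the set of all curves in iteration i
--     and the set of all curves in iteration j. The returned dict has key, value pairs i, Li, where Li is a dict with key,
--     value pairs j, Sij.
--
--     Assumes iterations is output of collect_curves().
--     """
--     similarities = {i: dict() for i in iter_indices}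
--     for i in iter_indices:
--         # Iterations to compare i with
--         compare = []
--         for j in iter_indices:
--             # Don't want to do (i, j) and (j, i), nor (i, i)
--             # Can do this because iter_indices is sorted
--             if j > i:
--                 compare.append(j)
--
--         for j in compare:
--             similarities[i].update({j: iterations[i].intersection(iterations[j])})
--
--     return similarities
-- ===== SOURCE B (Python) =====
-- def pairwise_duplicates(iterations, iter_indices):
--     """Inverted-index re-implementation: group iterations by curve once, then
--     fill each pairwise intersection in a single pass per iteration."""
--     # curve -> set of iteration numbers containing it
--     index = {}
--     for k, curves in iterations.items():
--         for c in curves: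
--             index.setdefault(c, set()).add(k)
--     similarities = {}
--     for i in iter_indices:
--         sims_i = {j: set() for j in iter_indices if j > i}
--         if sims_i:
--             for c in iterations[i]:
--                 for j in index[c]:
--                     if j in sims_i:
--                         sims_i[j].add(c)
--         similarities[i] = sims_i
--     return similarities
-- ===== Notes on version B (the rewrite author's own statement) =====
-- stated objective: alternative
-- what changed: Replaces A's quadratic pairwise rescanning (for every i, scan iter_indices to build compare, then intersect sets pair by pair) with an inverted curve-to-iterations index built once, after which each pair's intersection is filled by a single grouping pass over iteration i's curves.
import Mathlib
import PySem

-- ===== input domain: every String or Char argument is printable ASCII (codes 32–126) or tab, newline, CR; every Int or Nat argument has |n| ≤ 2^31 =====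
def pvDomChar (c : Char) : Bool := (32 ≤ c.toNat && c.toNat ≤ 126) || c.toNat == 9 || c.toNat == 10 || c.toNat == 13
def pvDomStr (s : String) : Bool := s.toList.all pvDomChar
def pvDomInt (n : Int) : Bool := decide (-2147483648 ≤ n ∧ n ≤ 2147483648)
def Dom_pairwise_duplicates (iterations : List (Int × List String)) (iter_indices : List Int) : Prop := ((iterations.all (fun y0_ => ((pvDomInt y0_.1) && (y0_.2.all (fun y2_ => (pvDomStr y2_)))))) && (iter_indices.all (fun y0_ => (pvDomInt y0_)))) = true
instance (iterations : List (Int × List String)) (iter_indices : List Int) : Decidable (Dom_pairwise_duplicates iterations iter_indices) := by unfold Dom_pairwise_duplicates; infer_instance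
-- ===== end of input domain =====

-- B replaces the pairwise rescanning with an inverted curve → iterations index
-- filled in one grouping pass per iteration (objective: alternative decomposition).

-- ===== PORT A =====
def pairwise_duplicates (iterations : List (Int × List String)) (iter_indices : List Int) : List (Int × List (Int × List String)) :=
  let its : PySem.Dict Int (List String) := PySem.Dict.mk iterations
  -- similarities = {i: dict() for i in iter_indices}
  let sims0 : PySem.Dict Int (PySem.Dict Int (PySem.Set String)) :=
    iter_indices.foldl (fun d i => d.insert i PySem.Dict.empty) PySem.Dict.empty
  -- for i in iter_indices: build compare, then update similarities[i]
  let sims := iter_indices.foldl (fun sims i =>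
      let compare : List Int := iter_indices.foldl (fun acc j => if j > i then acc ++ [j] else acc) []
      compare.foldl (fun sims j =>
        sims.insert i ((sims.getD i PySem.Dict.empty).insert j
          (PySem.Set.inter (its.getD i []) (its.getD j [])))) sims) sims0
  sims.items.map (fun p => (p.1, p.2.items))

-- ===== PORT B =====
def pairwise_duplicates_alt (iterations : List (Int × List String)) (iter_indices : List Int) : List (Int × List (Int × List String)) :=
  let its : PySem.Dict Int (List String) := PySem.Dict.mk iterations
  -- index: curve -> set of iteration numbers containing it (built from iterations.items())
  let index : PySem.Dict String (PySem.Set Int) :=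
    its.items.foldl (fun idx p =>
      p.2.foldl (fun idx c =>
        idx.insert c (PySem.Set.add (idx.getD c PySem.Set.empty) p.1)) idx) PySem.Dict.empty
  let sims := iter_indices.foldl (fun sims i =>
      -- sims_i = {j: set() for j in iter_indices if j > i}
      let simsI0 : PySem.Dict Int (PySem.Set String) :=
        (iter_indices.filter (fun j => j > i)).foldl (fun d j => d.insert j PySem.Set.empty) PySem.Dict.empty
      -- if sims_i: for c in iterations[i]: for j in index[c]: if j in sims_i: sims_i[j].add(c)
      let simsI := if simsI0.size = 0 then simsI0 else
        (its.getD i []).foldl (fun d c =>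
          (index.getD c PySem.Set.empty).foldl (fun d j =>
            if d.contains j then d.insert j (PySem.Set.add (d.getD j PySem.Set.empty) c) else d) d) simsI0
      sims.insert i simsI) PySem.Dict.empty
  sims.items.map (fun p => (p.1, p.2.items))

-- ===== PRECONDITION & SPEC =====
-- Pre_ excludes (a) inputs on which A raises KeyError: some entry of iter_indices that has a
-- distinct companion in iter_indices (so it takes part in a comparison) is not a key of
-- iterations; and (b) association lists with duplicate keys or with duplicate elements inside
-- a value, which encode no Python input (iterations is a dict of sets: keys are unique and set
-- elements are distinct; fed a plain list value, A raises AttributeError at .intersection).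
def Pre_pairwise_duplicates (iterations : List (Int × List String)) (iter_indices : List Int) : Prop :=
  (∀ i ∈ iter_indices, ((PySem.Dict.mk iterations).contains i = true ∨ ∀ j ∈ iter_indices, j = i)) ∧
  (iterations.map Prod.fst).Nodup ∧
  (∀ p ∈ iterations, p.2.Nodup)
instance (iterations : List (Int × List String)) (iter_indices : List Int) : Decidable (Pre_pairwise_duplicates iterations iter_indices) := by unfold Pre_pairwise_duplicates; infer_instance
def pvWitness_pairwise_duplicates : (List (Int × List String)) × List Int :=
  ([(0, ["a", "b"]), (1, ["b"])], [0, 1])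
def Spec_pairwise_duplicates (iterations : List (Int × List String)) (iter_indices : List Int) (out : List (Int × List (Int × List String))) : Prop := out = pairwise_duplicates_alt iterations iter_indices
instance (iterations : List (Int × List String)) (iter_indices : List Int) (out : List (Int × List (Int × List String))) : Decidable (Spec_pairwise_duplicates iterations iter_indices out) := by unfold Spec_pairwise_duplicates; infer_instance

-- ===== CLAIM (what is proved, stated in full; the proofs are below) =====
def Claim_equal_pairwise_duplicates : Prop := ∀ (iterations : List (Int × List String)) (iter_indices : List Int), Dom_pairwise_duplicates iterations iter_indices → Pre_pairwise_duplicates iterations iter_indices → Spec_pairwise_duplicates iterations iter_indices (pairwise_duplicates iterations iter_indices)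

-- ===== LEMMAS AND PROOFS =====

theorem pv_get?_foldl_insert_const {κ ν : Type} [BEq κ] [LawfulBEq κ] [DecidableEq κ]
    (l : List κ) (v : κ → ν) (d : PySem.Dict κ ν) (x : κ) :
    (l.foldl (fun d k => d.insert k (v k)) d).get? x = if x ∈ l then some (v x) else d.get? x := by
  induction l generalizing d with
  | nil => simp
  | cons k rest ih =>
    simp only [List.foldl_cons, ih, PySem.Dict.get?_insert, List.mem_cons]
    by_cases hx : x ∈ rest
    · simp [hx]
    · by_cases hk : x = k <;> simp [hx, hk]

theorem pv_insert_eq_self {κ ν : Type} [BEq κ] [LawfulBEq κ]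
    (d : PySem.Dict κ ν) (k : κ) (v : ν) (hnd : d.keys.Nodup) (h : d.get? k = some v) :
    d.insert k v = d := by
  have hc : d.contains k = true := by
    rw [PySem.Dict.contains_eq_isSome_get?, h]; rfl
  apply PySem.Dict.ext
  rw [PySem.Dict.items_insert_of_contains d v hc]
  conv_rhs => rw [← List.map_id d.items]
  apply List.map_congr_left
  intro p hp
  by_cases hpk : p.1 = k
  · have hm : (k, p.2) ∈ d.items := by rw [← hpk]; exact hp
    have : d.get? k = some p.2 := PySem.Dict.get?_of_mem_items d hm hnd
    have hv : p.2 = v := by rw [h] at this; exact ((Option.some.injEq _ _).mp this).symm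
    simp only [hpk, beq_self_eq_true, if_pos]
    rw [← hpk, ← hv]; rfl
  · simp [hpk]

theorem pv_foldl_insert_const_absorb {κ ν : Type} [BEq κ] [LawfulBEq κ]
    (l : List κ) (v : κ → ν) (d : PySem.Dict κ ν) (hnd : d.keys.Nodup)
    (h : ∀ k ∈ l, d.get? k = some (v k)) :
    l.foldl (fun d k => d.insert k (v k)) d = d := by
  induction l with
  | nil => simp
  | cons k rest ih =>
    simp only [List.foldl_cons]
    rw [pv_insert_eq_self d k (v k) hnd (h k (by simp))]
    exact ih (fun k' hk' => h k' (by simp [hk']))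

theorem pv_foldl_insert_at_key {ν : Type}
    (l : List Int) (v : Int → ν → ν) (s0 : PySem.Dict Int ν) (i : Int) (e : ν) (d0 : ν)
    (hnd : s0.keys.Nodup) (h : s0.get? i = some d0) :
    l.foldl (fun s j => s.insert i (v j (s.getD i e))) s0
      = s0.insert i (l.foldl (fun d j => v j d) d0) := by
  induction l generalizing s0 d0 with
  | nil => exact (pv_insert_eq_self s0 i d0 hnd h).symm
  | cons j rest ih =>
    simp only [List.foldl_cons]
    have hg : s0.getD i e = d0 := PySem.Dict.getD_of_get?_eq_some s0 e h
    rw [hg]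
    have hc : s0.contains i = true := by rw [PySem.Dict.contains_eq_isSome_get?, h]; rfl
    have hk : (s0.insert i (v j d0)).keys = s0.keys := PySem.Dict.keys_insert_of_contains _ _ hc
    rw [ih (s0.insert i (v j d0)) (v j d0) (hk ▸ hnd) (PySem.Dict.get?_insert_self _ _ _)]
    rw [PySem.Dict.insert_insert_self]

def pvIts (iterations : List (Int × List String)) : PySem.Dict Int (List String) :=
  PySem.Dict.mk iterations

def pvIndex (iterations : List (Int × List String)) :
    PySem.Dict String (PySem.Set Int) :=
  iterations.foldl (fun idx p =>
      p.2.foldl (fun idx c =>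
        idx.insert c (PySem.Set.add (idx.getD c PySem.Set.empty) p.1)) idx) PySem.Dict.empty

theorem pv_index_inner (cs : List String) (k : Int) (idx : PySem.Dict String (PySem.Set Int))
    (c : String) (j : Int) :
    j ∈ (cs.foldl (fun idx c' => idx.insert c' (PySem.Set.add (idx.getD c' PySem.Set.empty) k)) idx).getD c PySem.Set.empty
      ↔ j ∈ idx.getD c PySem.Set.empty ∨ (j = k ∧ c ∈ cs) := by
  induction cs generalizing idx with
  | nil => simp
  | cons c' rest ih =>
    simp only [List.foldl_cons, ih, PySem.Dict.getD_insert, List.mem_cons]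
    by_cases hc : c = c'
    · simp only [hc, if_true, PySem.Set.mem_add]
      tauto
    · simp only [if_neg hc]
      tauto

theorem pv_index_mem (iterations : List (Int × List String)) (c : String) (j : Int) :
    j ∈ (pvIndex iterations).getD c PySem.Set.empty
      ↔ ∃ p ∈ iterations, j = p.1 ∧ c ∈ p.2 := by
  have main : ∀ (l : List (Int × List String)) (idx : PySem.Dict String (PySem.Set Int)),
      j ∈ (l.foldl (fun idx p =>
        p.2.foldl (fun idx c' =>
          idx.insert c' (PySem.Set.add (idx.getD c' PySem.Set.empty) p.1)) idx) idx).getD c PySem.Set.empty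
      ↔ j ∈ idx.getD c PySem.Set.empty ∨ (∃ p ∈ l, j = p.1 ∧ c ∈ p.2) := by
    intro l
    induction l with
    | nil => simp
    | cons p rest ih =>
      intro idx
      simp only [List.foldl_cons, ih, pv_index_inner, List.mem_cons]
      constructor
      · rintro ((h | ⟨rfl, hc⟩) | ⟨q, hq, rfl, hc⟩)
        · exact Or.inl h
        · exact Or.inr ⟨p, Or.inl rfl, rfl, hc⟩
        · exact Or.inr ⟨q, Or.inr hq, rfl, hc⟩
      · rintro (h | ⟨q, (rfl | hq), rfl, hc⟩)
        · exact Or.inl (Or.inl h)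
        · exact Or.inl (Or.inr ⟨rfl, hc⟩)
        · exact Or.inr ⟨q, hq, rfl, hc⟩
  rw [pvIndex, main]
  simp [PySem.Dict.getD_empty, PySem.Set.empty]

theorem pv_index_mem' (iterations : List (Int × List String)) (c : String) (j : Int)
    (hknd : (iterations.map Prod.fst).Nodup) :
    j ∈ (pvIndex iterations).getD c PySem.Set.empty
      ↔ (pvIts iterations).contains j = true ∧ c ∈ (pvIts iterations).getD j [] := by
  have hknd' : (pvIts iterations).keys.Nodup := hknd
  rw [pv_index_mem]
  constructor
  · rintro ⟨p, hp, rfl, hc⟩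
    have hg : (pvIts iterations).get? p.1 = some p.2 :=
      PySem.Dict.get?_of_mem_items (pvIts iterations) hp hknd'
    constructor
    · rw [PySem.Dict.contains_eq_isSome_get?, hg]; rfl
    · rw [PySem.Dict.getD_of_get?_eq_some _ _ hg]; exact hc
  · rintro ⟨hcon, hc⟩
    have hsome : ((pvIts iterations).get? j).isSome := by
      rw [← PySem.Dict.contains_eq_isSome_get?]; exact hcon
    obtain ⟨v, hv⟩ := Option.isSome_iff_exists.mp hsome
    refine ⟨(j, v), PySem.Dict.mem_items_of_get?_eq_some _ hv, rfl, ?_⟩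
    rw [PySem.Dict.getD_of_get?_eq_some _ _ hv] at hc
    exact hc

def pvCompare (iter_indices : List Int) (i : Int) : List Int :=
  iter_indices.filter (fun j => j > i)
theorem pv_its_nodup (iterations : List (Int × List String)) (k : Int)
    (h : ∀ p ∈ iterations, p.2.Nodup) : ((pvIts iterations).getD k []).Nodup := by
  cases hg : (pvIts iterations).get? k with
  | none => rw [PySem.Dict.getD_of_get?_eq_none _ _ hg]; exact List.nodup_nil
  | some v =>
    rw [PySem.Dict.getD_of_get?_eq_some _ _ hg]
    simp only [pvIts, PySem.Dict.get?] at hg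
    cases hf : List.find? (fun p => p.1 == k) (PySem.Dict.mk iterations).items with
    | none => rw [hf] at hg; simp at hg
    | some p =>
      rw [hf] at hg
      simp only [Option.map_some] at hg
      have hp : p ∈ iterations := List.mem_of_find?_eq_some hf
      rw [← (Option.some.injEq _ _).mp hg]
      exact h p hp

-- one curve c distributed to all its (i <)-iterations: effect on get? j
-- one curve c distributed to the iterations of its index entry: effect on get? j
theorem pv_fill_inner_some (L : List Int) (j : Int) (c : String)
    (d : PySem.Dict Int (PySem.Set String)) (s0 : PySem.Set String)
    (h : d.get? j = some s0) :
    (L.foldl (fun d j' => if d.contains j' then d.insert j' (PySem.Set.add (d.getD j' PySem.Set.empty) c) else d) d).get? j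
      = some (if j ∈ L then PySem.Set.add s0 c else s0) := by
  induction L generalizing d s0 with
  | nil => simpa using h
  | cons j' rest ih =>
    simp only [List.foldl_cons]
    by_cases hjj' : j = j'
    · subst hjj'
      have hc : d.contains j = true := by rw [PySem.Dict.contains_eq_isSome_get?, h]; rfl
      rw [if_pos hc]
      have hg : d.getD j PySem.Set.empty = s0 := PySem.Dict.getD_of_get?_eq_some d _ h
      rw [hg, ih _ _ (PySem.Dict.get?_insert_self _ _ _)]
      by_cases hr : j ∈ rest
      · simp [hr]
      · simp [hr]
    · have hstep : ∀ d' : PySem.Dict Int (PySem.Set String),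
          d' = (if d.contains j' then d.insert j' (PySem.Set.add (d.getD j' PySem.Set.empty) c) else d) →
          d'.get? j = some s0 := by
        intro d' hd'
        by_cases hc : d.contains j' = true
        · rw [hd', if_pos hc, PySem.Dict.get?_insert, if_neg hjj']; exact h
        · rw [hd', if_neg hc]; exact h
      rw [ih _ _ (hstep _ rfl)]
      by_cases hr : j ∈ rest
      · simp [hr]
      · simp [hr, hjj']

theorem pv_fill_inner_none (L : List Int) (c : String)
    (d : PySem.Dict Int (PySem.Set String)) (j : Int)
    (h : d.get? j = none) :
    (L.foldl (fun d j' => if d.contains j' then d.insert j' (PySem.Set.add (d.getD j' PySem.Set.empty) c) else d) d).get? j = none := by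
  induction L generalizing d with
  | nil => simpa using h
  | cons j' rest ih =>
    simp only [List.foldl_cons]
    by_cases hc : d.contains j' = true
    · rw [if_pos hc]
      have hjj' : j ≠ j' := by
        rintro rfl
        rw [PySem.Dict.contains_eq_isSome_get?, h] at hc
        cases hc
      exact ih _ (by rw [PySem.Dict.get?_insert, if_neg hjj']; exact h)
    · rw [if_neg hc]
      exact ih _ h

theorem pv_fill_inner_keys (L : List Int) (c : String)
    (d : PySem.Dict Int (PySem.Set String)) :
    (L.foldl (fun d j' => if d.contains j' then d.insert j' (PySem.Set.add (d.getD j' PySem.Set.empty) c) else d) d).keys = d.keys := by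
  induction L generalizing d with
  | nil => rfl
  | cons j' rest ih =>
    simp only [List.foldl_cons]
    by_cases hc : d.contains j' = true
    · rw [if_pos hc, ih, PySem.Dict.keys_insert_of_contains _ _ hc]
    · rw [if_neg hc, ih]

theorem pv_fill_some (cs : List String) (g : String → List Int) (j : Int)
    (d : PySem.Dict Int (PySem.Set String)) (s0 : PySem.Set String)
    (h : d.get? j = some s0) :
    (cs.foldl (fun d c => (g c).foldl (fun d j' => if d.contains j' then d.insert j' (PySem.Set.add (d.getD j' PySem.Set.empty) c) else d) d) d).get? j
      = some (cs.foldl (fun s c => if j ∈ g c then PySem.Set.add s c else s) s0) := by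
  induction cs generalizing d s0 with
  | nil => simpa using h
  | cons c rest ih =>
    simp only [List.foldl_cons]
    exact ih _ _ (pv_fill_inner_some (g c) j c d s0 h)

theorem pv_fill_none (cs : List String) (g : String → List Int) (j : Int)
    (d : PySem.Dict Int (PySem.Set String))
    (h : d.get? j = none) :
    (cs.foldl (fun d c => (g c).foldl (fun d j' => if d.contains j' then d.insert j' (PySem.Set.add (d.getD j' PySem.Set.empty) c) else d) d) d).get? j = none := by
  induction cs generalizing d with
  | nil => simpa using h
  | cons c rest ih =>
    simp only [List.foldl_cons]
    exact ih _ (pv_fill_inner_none (g c) c d j h)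

theorem pv_fill_keys (cs : List String) (g : String → List Int)
    (d : PySem.Dict Int (PySem.Set String)) :
    (cs.foldl (fun d c => (g c).foldl (fun d j' => if d.contains j' then d.insert j' (PySem.Set.add (d.getD j' PySem.Set.empty) c) else d) d) d).keys = d.keys := by
  induction cs generalizing d with
  | nil => rfl
  | cons c rest ih =>
    simp only [List.foldl_cons]
    rw [ih, pv_fill_inner_keys]

def pvInnerA (iterations : List (Int × List String)) (iter_indices : List Int) (i : Int) :
    PySem.Dict Int (PySem.Set String) :=
  (pvCompare iter_indices i).foldl
    (fun d j => d.insert j (PySem.Set.inter ((pvIts iterations).getD i []) ((pvIts iterations).getD j []))) PySem.Dict.empty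

def pvInnerB (iterations : List (Int × List String)) (iter_indices : List Int) (i : Int) :
    PySem.Dict Int (PySem.Set String) :=
  let simsI0 : PySem.Dict Int (PySem.Set String) :=
    (pvCompare iter_indices i).foldl (fun d j => d.insert j PySem.Set.empty) PySem.Dict.empty
  if simsI0.size = 0 then simsI0 else
    ((pvIts iterations).getD i []).foldl (fun d c =>
        ((pvIndex iterations).getD c PySem.Set.empty).foldl (fun d j =>
          if d.contains j then d.insert j (PySem.Set.add (d.getD j PySem.Set.empty) c) else d) d) simsI0

theorem pv_mem_compare (iter_indices : List Int) (i j : Int) :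
    j ∈ pvCompare iter_indices i ↔ j ∈ iter_indices ∧ j > i := by
  simp [pvCompare]

theorem pv_innerA_get (iterations : List (Int × List String)) (iter_indices : List Int) (i j : Int) :
    (pvInnerA iterations iter_indices i).get? j
      = if j ∈ pvCompare iter_indices i
          then some (PySem.Set.inter ((pvIts iterations).getD i []) ((pvIts iterations).getD j []))
          else none := by
  rw [pvInnerA, pv_get?_foldl_insert_const]
  by_cases h : j ∈ pvCompare iter_indices i <;> simp [h]

theorem pv_innerA_keys (iterations : List (Int × List String)) (iter_indices : List Int) (i : Int) :
    (pvInnerA iterations iter_indices i).keys = PySem.Set.ofList (pvCompare iter_indices i) := by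
  rw [pvInnerA, PySem.Dict.keys_foldl_insert (f := fun _ j => PySem.Set.inter ((pvIts iterations).getD i []) ((pvIts iterations).getD j []))]
  rw [PySem.Dict.keys_empty, PySem.Set.update_nil_left]

theorem pv_preinit_keys (iter_indices : List Int) (i : Int) :
    ((pvCompare iter_indices i).foldl (fun d j => d.insert j (PySem.Set.empty : PySem.Set String)) PySem.Dict.empty).keys
      = PySem.Set.ofList (pvCompare iter_indices i) := by
  rw [PySem.Dict.keys_foldl_insert (f := fun _ _ => PySem.Set.empty), PySem.Dict.keys_empty, PySem.Set.update_nil_left]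

theorem pv_innerB_keys (iterations : List (Int × List String)) (iter_indices : List Int) (i : Int) :
    (pvInnerB iterations iter_indices i).keys = PySem.Set.ofList (pvCompare iter_indices i) := by
  simp only [pvInnerB]
  by_cases h : ((pvCompare iter_indices i).foldl (fun d j => d.insert j (PySem.Set.empty : PySem.Set String)) PySem.Dict.empty).size = 0
  · rw [if_pos h]
    exact pv_preinit_keys iter_indices i
  · rw [if_neg h, pv_fill_keys, pv_preinit_keys]

theorem pv_innerB_get (iterations : List (Int × List String)) (iter_indices : List Int) (i j : Int)
    (hknd : (iterations.map Prod.fst).Nodup)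
    (hkey : ∀ x ∈ iter_indices, ((pvIts iterations).contains x = true ∨ ∀ y ∈ iter_indices, y = x))
    (hnod : ∀ p ∈ iterations, p.2.Nodup) (hi : i ∈ iter_indices) :
    (pvInnerB iterations iter_indices i).get? j
      = if j ∈ pvCompare iter_indices i
          then some (PySem.Set.inter ((pvIts iterations).getD i []) ((pvIts iterations).getD j []))
          else none := by
  have hpre : ∀ x, (((pvCompare iter_indices i).foldl (fun d j => d.insert j (PySem.Set.empty : PySem.Set String)) PySem.Dict.empty).get? x)
      = if x ∈ pvCompare iter_indices i then some (PySem.Set.empty : PySem.Set String) else none := by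
    intro x
    rw [pv_get?_foldl_insert_const (v := fun _ => PySem.Set.empty)]
    by_cases h : x ∈ pvCompare iter_indices i <;> simp [h]
  simp only [pvInnerB]
  by_cases hsz : ((pvCompare iter_indices i).foldl (fun d j => d.insert j (PySem.Set.empty : PySem.Set String)) PySem.Dict.empty).size = 0
  · -- the guard fires: compare is empty, nothing to fill
    rw [if_pos hsz]
    have hcmp : pvCompare iter_indices i = [] := by
      have hkeys := pv_preinit_keys iter_indices i
      have hkeysnil : ((pvCompare iter_indices i).foldl (fun d j => d.insert j (PySem.Set.empty : PySem.Set String)) PySem.Dict.empty).keys = [] := by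
        have := List.length_eq_zero_iff.mp hsz
        simp only [PySem.Dict.keys, this, List.map_nil]
      rw [hkeys] at hkeysnil
      cases hc : pvCompare iter_indices i with
      | nil => rfl
      | cons a l =>
        exfalso
        have : a ∈ PySem.Set.ofList (pvCompare iter_indices i) := by
          rw [PySem.Set.mem_ofList, hc]; simp
        rw [hkeysnil] at this
        cases this
    rw [hpre, hcmp]
    simp
  · rw [if_neg hsz]
    by_cases hj : j ∈ pvCompare iter_indices i
    · rw [if_pos hj]
      rw [pv_fill_some _ _ _ _ PySem.Set.empty (by rw [hpre, if_pos hj])]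
      have hjii : j ∈ iter_indices := ((pv_mem_compare _ _ _).mp hj).1
      have hji : j > i := ((pv_mem_compare _ _ _).mp hj).2
      have hconj : (pvIts iterations).contains j = true := by
        rcases hkey j hjii with h | hall
        · exact h
        · exact absurd (hall i hi) (by omega)
      congr 1
      rw [PySem.List.foldl_congr_mem _ _
          (fun s c => if c ∈ (pvIts iterations).getD j [] then PySem.Set.add s c else s) _ ?_]
      · rw [PySem.List.foldl_ite_eq_foldl_filter]
        rw [show (PySem.Set.empty : PySem.Set String) = [] from rfl, ← PySem.Set.ofList_eq_foldl]
        rw [PySem.Set.ofList_eq_self_of_nodup _ ((pv_its_nodup iterations i hnod).filter _)]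
        simp [PySem.Set.inter]
      · intro acc c _
        apply if_congr _ rfl rfl
        rw [pv_index_mem' iterations c j hknd]
        constructor
        · rintro ⟨_, hc⟩; exact hc
        · intro hc; exact ⟨hconj, hc⟩
    · rw [if_neg hj]
      apply pv_fill_none
      rw [hpre, if_neg hj]

theorem pv_inner_eq (iterations : List (Int × List String)) (iter_indices : List Int) (i : Int)
    (hknd : (iterations.map Prod.fst).Nodup)
    (hkey : ∀ x ∈ iter_indices, ((pvIts iterations).contains x = true ∨ ∀ y ∈ iter_indices, y = x))
    (hnod : ∀ p ∈ iterations, p.2.Nodup) (hi : i ∈ iter_indices) :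
    pvInnerA iterations iter_indices i = pvInnerB iterations iter_indices i := by
  apply PySem.Dict.ext
  have hka := pv_innerA_keys iterations iter_indices i
  have hkb := pv_innerB_keys iterations iter_indices i
  rw [PySem.Dict.items_eq_map_keys _ (by rw [hka]; exact PySem.Set.nodup_ofList _) ([] : PySem.Set String),
      PySem.Dict.items_eq_map_keys _ (by rw [hkb]; exact PySem.Set.nodup_ofList _) ([] : PySem.Set String),
      hka, hkb]
  apply List.map_congr_left
  intro k hk
  rw [PySem.Set.mem_ofList] at hk
  have ha := pv_innerA_get iterations iter_indices i k
  have hb := pv_innerB_get iterations iter_indices i k hknd hkey hnod hi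
  rw [if_pos hk] at ha hb
  rw [PySem.Dict.getD_of_get?_eq_some _ _ ha, PySem.Dict.getD_of_get?_eq_some _ _ hb]

theorem pv_compare_foldl (iter_indices : List Int) (i : Int) :
    iter_indices.foldl (fun acc j => if j > i then acc ++ [j] else acc) []
      = pvCompare iter_indices i := by
  have main : ∀ (l : List Int) (acc : List Int),
      l.foldl (fun acc j => if j > i then acc ++ [j] else acc) acc
        = acc ++ l.filter (fun j => j > i) := by
    intro l
    induction l with
    | nil => simp
    | cons j rest ih =>
      intro acc
      simp only [List.foldl_cons, List.filter_cons]
      by_cases hj : j > i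
      · simp only [hj, decide_true, ih]
        simp
      · simp only [hj, decide_false, ih]
        simp
  rw [pvCompare]
  simpa using main iter_indices []

theorem pv_outerA_eq (iterations : List (Int × List String)) (iter_indices : List Int) :
    ∀ (l : List Int) (sims : PySem.Dict Int (PySem.Dict Int (PySem.Set String))),
    (∀ x ∈ l, x ∈ iter_indices) →
    sims.keys = PySem.Set.ofList iter_indices →
    (∀ x, sims.get? x = none ∨ sims.get? x = some PySem.Dict.empty ∨ sims.get? x = some (pvInnerA iterations iter_indices x)) →
    l.foldl (fun sims i =>
        (iter_indices.foldl (fun acc j => if j > i then acc ++ [j] else acc) []).foldl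
          (fun sims j => sims.insert i ((sims.getD i PySem.Dict.empty).insert j
            (PySem.Set.inter ((pvIts iterations).getD i []) ((pvIts iterations).getD j [])))) sims) sims
      = l.foldl (fun s i => s.insert i (pvInnerA iterations iter_indices i)) sims := by
  intro l
  induction l with
  | nil => intro sims _ _ _; rfl
  | cons i rest ih =>
    intro sims hl hkeys hinv
    have hiI : i ∈ iter_indices := hl i (by simp)
    have hik : i ∈ sims.keys := by rw [hkeys, PySem.Set.mem_ofList]; exact hiI
    have hc : sims.contains i = true := (PySem.Dict.contains_iff_mem_keys _ _).mpr hik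
    have hsome : (sims.get? i).isSome := by rw [← PySem.Dict.contains_eq_isSome_get?]; exact hc
    obtain ⟨d0, hd0⟩ := Option.isSome_iff_exists.mp hsome
    have hnd : sims.keys.Nodup := by rw [hkeys]; exact PySem.Set.nodup_ofList _
    simp only [List.foldl_cons]
    rw [pv_compare_foldl]
    rw [pv_foldl_insert_at_key (pvCompare iter_indices i)
        (fun j d => d.insert j (PySem.Set.inter ((pvIts iterations).getD i []) ((pvIts iterations).getD j [])))
        sims i PySem.Dict.empty d0 hnd hd0]
    have hfold : (pvCompare iter_indices i).foldl
        (fun d j => d.insert j (PySem.Set.inter ((pvIts iterations).getD i []) ((pvIts iterations).getD j []))) d0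
        = pvInnerA iterations iter_indices i := by
      rcases hinv i with h | h | h
      · rw [h] at hd0; cases hd0
      · rw [h] at hd0
        rw [← (Option.some.injEq _ _).mp hd0]
        rfl
      · rw [h] at hd0
        rw [← (Option.some.injEq _ _).mp hd0]
        apply pv_foldl_insert_const_absorb
          (v := fun j => PySem.Set.inter ((pvIts iterations).getD i []) ((pvIts iterations).getD j []))
        · rw [pv_innerA_keys]; exact PySem.Set.nodup_ofList _
        · intro j hj
          rw [pv_innerA_get, if_pos hj]
    rw [hfold]
    have hkeys' : (sims.insert i (pvInnerA iterations iter_indices i)).keys = PySem.Set.ofList iter_indices := by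
      rw [PySem.Dict.keys_insert_of_contains _ _ hc, hkeys]
    rw [ih (sims.insert i (pvInnerA iterations iter_indices i)) (fun x hx => hl x (by simp [hx])) hkeys' ?_]
    intro x
    rw [PySem.Dict.get?_insert]
    by_cases hx : x = i
    · subst hx; rw [if_pos rfl]; right; right; rfl
    · rw [if_neg hx]; exact hinv x

theorem pv_update_self {α : Type} [BEq α] [LawfulBEq α] (l : List α) :
    PySem.Set.update (PySem.Set.ofList l) l = PySem.Set.ofList l := by
  rw [PySem.Set.update_eq_append_filter]
  have : (PySem.Set.ofList l).filter (fun y => !(PySem.Set.ofList l).contains y) = [] := by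
    apply List.filter_eq_nil_iff.mpr
    intro a ha
    simp only [Bool.not_eq_eq_eq_not, Bool.not_true]
    simp only [PySem.Set.contains_eq_listContains, List.contains_eq_mem, decide_eq_false_iff_not]
    intro hmem
    exact hmem (by simpa using ha)
  rw [this, List.append_nil]

def pvOuterA (iterations : List (Int × List String)) (iter_indices : List Int) :
    PySem.Dict Int (PySem.Dict Int (PySem.Set String)) :=
  iter_indices.foldl (fun sims i =>
      (iter_indices.foldl (fun acc j => if j > i then acc ++ [j] else acc) []).foldl
        (fun sims j => sims.insert i ((sims.getD i PySem.Dict.empty).insert j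
          (PySem.Set.inter ((pvIts iterations).getD i []) ((pvIts iterations).getD j [])))) sims)
    (iter_indices.foldl (fun d i => d.insert i PySem.Dict.empty) PySem.Dict.empty)

def pvOuterB (iterations : List (Int × List String)) (iter_indices : List Int) :
    PySem.Dict Int (PySem.Dict Int (PySem.Set String)) :=
  iter_indices.foldl (fun sims i => sims.insert i (pvInnerB iterations iter_indices i)) PySem.Dict.empty

theorem pv_portA_eq (iterations : List (Int × List String)) (iter_indices : List Int) :
    pairwise_duplicates iterations iter_indices
      = (pvOuterA iterations iter_indices).items.map (fun p => (p.1, p.2.items)) := rfl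

theorem pv_portB_eq (iterations : List (Int × List String)) (iter_indices : List Int) :
    pairwise_duplicates_alt iterations iter_indices
      = (pvOuterB iterations iter_indices).items.map (fun p => (p.1, p.2.items)) := rfl

theorem pv_outer_eq (iterations : List (Int × List String)) (iter_indices : List Int)
    (hknd : (iterations.map Prod.fst).Nodup)
    (hkey : ∀ x ∈ iter_indices, ((pvIts iterations).contains x = true ∨ ∀ y ∈ iter_indices, y = x))
    (hnod : ∀ p ∈ iterations, p.2.Nodup) :
    pvOuterA iterations iter_indices = pvOuterB iterations iter_indices := by
  have hs0keys : (iter_indices.foldl (fun d i => d.insert i (PySem.Dict.empty : PySem.Dict Int (PySem.Set String))) PySem.Dict.empty).keys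
      = PySem.Set.ofList iter_indices := by
    rw [PySem.Dict.keys_foldl_insert (f := fun _ _ => PySem.Dict.empty), PySem.Dict.keys_empty, PySem.Set.update_nil_left]
  have hs0get : ∀ x, (iter_indices.foldl (fun d i => d.insert i (PySem.Dict.empty : PySem.Dict Int (PySem.Set String))) PySem.Dict.empty).get? x
      = if x ∈ iter_indices then some PySem.Dict.empty else none := by
    intro x
    rw [pv_get?_foldl_insert_const (v := fun _ => PySem.Dict.empty)]
    by_cases h : x ∈ iter_indices <;> simp [h]
  have hA : pvOuterA iterations iter_indices
      = iter_indices.foldl (fun s i => s.insert i (pvInnerA iterations iter_indices i))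
          (iter_indices.foldl (fun d i => d.insert i PySem.Dict.empty) PySem.Dict.empty) := by
    rw [pvOuterA]
    apply pv_outerA_eq iterations iter_indices iter_indices _ (fun x hx => hx) hs0keys
    intro x
    rw [hs0get]
    by_cases h : x ∈ iter_indices
    · right; left; rw [if_pos h]
    · left; rw [if_neg h]
  have hAget : ∀ x, (pvOuterA iterations iter_indices).get? x
      = if x ∈ iter_indices then some (pvInnerA iterations iter_indices x) else none := by
    intro x
    rw [hA, pv_get?_foldl_insert_const (v := fun i => pvInnerA iterations iter_indices i), hs0get]
    by_cases h : x ∈ iter_indices <;> simp [h]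
  have hBget : ∀ x, (pvOuterB iterations iter_indices).get? x
      = if x ∈ iter_indices then some (pvInnerB iterations iter_indices x) else none := by
    intro x
    rw [pvOuterB, pv_get?_foldl_insert_const (v := fun i => pvInnerB iterations iter_indices i)]
    by_cases h : x ∈ iter_indices <;> simp [h]
  have hAkeys : (pvOuterA iterations iter_indices).keys = PySem.Set.ofList iter_indices := by
    rw [hA, PySem.Dict.keys_foldl_insert (f := fun _ i => pvInnerA iterations iter_indices i), hs0keys, pv_update_self]
  have hBkeys : (pvOuterB iterations iter_indices).keys = PySem.Set.ofList iter_indices := by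
    rw [pvOuterB, PySem.Dict.keys_foldl_insert (f := fun _ i => pvInnerB iterations iter_indices i), PySem.Dict.keys_empty, PySem.Set.update_nil_left]
  apply PySem.Dict.ext
  rw [PySem.Dict.items_eq_map_keys _ (by rw [hAkeys]; exact PySem.Set.nodup_ofList _) (PySem.Dict.empty : PySem.Dict Int (PySem.Set String)),
      PySem.Dict.items_eq_map_keys _ (by rw [hBkeys]; exact PySem.Set.nodup_ofList _) (PySem.Dict.empty : PySem.Dict Int (PySem.Set String)),
      hAkeys, hBkeys]
  apply List.map_congr_left
  intro k hk
  have hkmem : k ∈ iter_indices := by simpa using hk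
  rw [PySem.Dict.getD_of_get?_eq_some _ _ (by rw [hAget, if_pos hkmem]),
      PySem.Dict.getD_of_get?_eq_some _ _ (by rw [hBget, if_pos hkmem])]
  rw [pv_inner_eq iterations iter_indices k hknd hkey hnod hkmem]

theorem pv_final (iterations : List (Int × List String)) (iter_indices : List Int)
    (hknd : (iterations.map Prod.fst).Nodup)
    (hkey : ∀ x ∈ iter_indices, ((pvIts iterations).contains x = true ∨ ∀ y ∈ iter_indices, y = x))
    (hnod : ∀ p ∈ iterations, p.2.Nodup) :
    pairwise_duplicates iterations iter_indices = pairwise_duplicates_alt iterations iter_indices := by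
  rw [pv_portA_eq, pv_portB_eq, pv_outer_eq iterations iter_indices hknd hkey hnod]

-- ===== VERDICT (by name: the statement is the Claim_ definition above) =====
theorem pairwise_duplicates_spec : Claim_equal_pairwise_duplicates := by
  intro iterations iter_indices _ hpre
  unfold Spec_pairwise_duplicates
  exact pv_final iterations iter_indices hpre.2.1 hpre.1 hpre.2.2
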